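-- pv_equiv track=rewrite | github.com/nhhoang14/CodePTIT_Source | CodePTIT - PYTHON/PY02003 - DÃY SỐ HAMMING.py | generate_hamming
-- ===== SOURCE A (Python) =====
-- def generate_hamming(limit):
--     hamming = [1]
--     i2 = i3 = i5 = 0
--
--     while True:
--         next_val = min(hamming[i2] * 2, hamming[i3] * 3, hamming[i5] * 5)
--         if next_val > limit:
--             break
--         hamming.append(next_val)
--         if next_val == hamming[i2] * 2:
--             i2 += 1
--         if next_val == hamming[i3] * 3:
--             i3 += 1
--         if next_val == hamming[i5] * 5:
--             i5 += 1
--     return {val: idx + 1 for idx, val in enumerate(hamming)}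
-- ===== SOURCE B (Python) =====
-- def generate_hamming(limit):
--     # Directly enumerate all products of powers of two, three and five up to limit, then sort.
--     # 1 is seeded unconditionally (it is the first Hamming number even when limit < 1).
--     vals = {1}
--     p2 = 1
--     while p2 <= limit:
--         p3 = p2
--         while p3 <= limit:
--             p5 = p3
--             while p5 <= limit:
--                 vals.add(p5)
--                 p5 *= 5
--             p3 *= 3
--         p2 *= 2
--     return {v: i + 1 for i, v in enumerate(sorted(vals))}
-- ===== Notes on version B (the rewrite author's own statement) =====
-- stated objective: alternative
-- what changed: Replaces the three-pointer incremental merge (one index per prime factor into the growing list) by direct enumeration of all products of powers of two, three and five up to the limit via nested power loops into a set, followed by one sort.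
import Mathlib
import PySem

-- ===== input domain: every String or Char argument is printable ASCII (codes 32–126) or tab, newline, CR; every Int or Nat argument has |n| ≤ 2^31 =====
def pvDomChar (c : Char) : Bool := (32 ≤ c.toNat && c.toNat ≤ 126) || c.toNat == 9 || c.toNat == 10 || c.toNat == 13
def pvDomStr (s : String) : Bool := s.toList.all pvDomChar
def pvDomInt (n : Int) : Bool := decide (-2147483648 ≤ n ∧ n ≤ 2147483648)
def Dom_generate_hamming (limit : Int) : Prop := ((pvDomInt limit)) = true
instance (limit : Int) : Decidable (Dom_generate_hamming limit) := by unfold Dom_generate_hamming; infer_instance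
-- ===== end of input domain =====

-- B re-implements A by directly enumerating all products of powers of two, three and five up to the limit and sorting,
-- instead of A's three-pointer incremental merge; equal return value on every int limit.

-- shared final step: {val: idx + 1 for idx, val in enumerate(lst)} (identical line in both Pythons)
def hammingDict (h : List Int) : List (Int × Int) :=
  ((PySem.List.enumerate h 0).foldl (fun d p => d.insert p.2 (p.1 + 1)) PySem.Dict.empty).items

-- ===== PORT A =====
-- the while loop, fueled (limit.toNat + 1 iterations always suffice: each append strictly
-- increases the last element, which stays ≤ limit).  i2/i3/i5 only ever grow from 0 by 1,
-- so Nat counters and List.getD are exact for Python's hamming[i2] (always in range).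
def aloop (limit : Int) : Nat → List Int → Nat → Nat → Nat → List Int
  | 0, h, _, _, _ => h
  | f + 1, h, i2, i3, i5 =>
    let v := min (min (h.getD i2 0 * 2) (h.getD i3 0 * 3)) (h.getD i5 0 * 5)
    if v > limit then h
    else aloop limit f (h ++ [v])
      (if v = h.getD i2 0 * 2 then i2 + 1 else i2)
      (if v = h.getD i3 0 * 3 then i3 + 1 else i3)
      (if v = h.getD i5 0 * 5 then i5 + 1 else i5)

def generate_hamming (limit : Int) : List (Int × Int) :=
  hammingDict (aloop limit (limit.toNat + 1) [1] 0 0 0)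

-- ===== PORT B =====
-- the three nested 'while p <= limit: ... p *= k' loops; the '0 < p' conjunct only makes the
-- recursion total (every call site has 0 < p, where it is Python's exact guard).
def bloop5 (limit p : Int) (vals : PySem.Set Int) : PySem.Set Int :=
  if _h : p ≤ limit ∧ 0 < p then bloop5 limit (p * 5) (PySem.Set.add vals p) else vals
termination_by (limit + 1 - p).toNat
decreasing_by
  have h1 : p + 1 ≤ p * 5 := by nlinarith [_h.2]
  omega

def bloop3 (limit p : Int) (vals : PySem.Set Int) : PySem.Set Int :=
  if _h : p ≤ limit ∧ 0 < p then bloop3 limit (p * 3) (bloop5 limit p vals) else vals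
termination_by (limit + 1 - p).toNat
decreasing_by
  have h1 : p + 1 ≤ p * 3 := by nlinarith [_h.2]
  omega

def bloop2 (limit p : Int) (vals : PySem.Set Int) : PySem.Set Int :=
  if _h : p ≤ limit ∧ 0 < p then bloop2 limit (p * 2) (bloop3 limit p vals) else vals
termination_by (limit + 1 - p).toNat
decreasing_by
  have h1 : p + 1 ≤ p * 2 := by nlinarith [_h.2]
  omega

def generate_hamming_alt (limit : Int) : List (Int × Int) :=
  let vals := bloop2 limit 1 (PySem.Set.ofList [1])
  hammingDict (PySem.List.sorted vals (fun x => x) false)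

-- ===== PRECONDITION & SPEC =====
def Spec_generate_hamming (limit : Int) (out : List (Int × Int)) : Prop := out = generate_hamming_alt limit
instance (limit : Int) (out : List (Int × Int)) : Decidable (Spec_generate_hamming limit out) := by unfold Spec_generate_hamming; infer_instance

-- ===== CLAIM (what is proved, stated in full; the proofs are below) =====
def Claim_equal_generate_hamming : Prop := ∀ (limit : Int), Dom_generate_hamming limit → Spec_generate_hamming limit (generate_hamming limit)

-- ===== LEMMAS AND PROOFS =====

def Smooth (n : Int) : Prop := ∃ a b c : ℕ, n = 2 ^ a * 3 ^ b * 5 ^ c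

lemma smooth_one : Smooth 1 := ⟨0, 0, 0, rfl⟩

lemma smooth_pos {n : Int} (h : Smooth n) : 1 ≤ n := by
  obtain ⟨a, b, c, rfl⟩ := h
  have h2 : (1:Int) ≤ 2 ^ a := one_le_pow₀ (by norm_num)
  have h3 : (1:Int) ≤ 3 ^ b := one_le_pow₀ (by norm_num)
  have h5 : (1:Int) ≤ 5 ^ c := one_le_pow₀ (by norm_num)
  have h23 : (1:Int) ≤ 2 ^ a * 3 ^ b := by nlinarith
  nlinarith

lemma smooth_mul_two {x : Int} (h : Smooth x) : Smooth (x * 2) := by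
  obtain ⟨a, b, c, rfl⟩ := h; exact ⟨a + 1, b, c, by ring⟩

lemma smooth_mul_three {x : Int} (h : Smooth x) : Smooth (x * 3) := by
  obtain ⟨a, b, c, rfl⟩ := h; exact ⟨a, b + 1, c, by ring⟩

lemma smooth_mul_five {x : Int} (h : Smooth x) : Smooth (x * 5) := by
  obtain ⟨a, b, c, rfl⟩ := h; exact ⟨a, b, c + 1, by ring⟩

-- every smooth number other than 1 has a smaller smooth "parent"
lemma smooth_cases {m : Int} (h : Smooth m) :
    m = 1 ∨ (2 ≤ m ∧ ∃ x, Smooth x ∧ 1 ≤ x ∧ x < m ∧ (m = x * 2 ∨ m = x * 3 ∨ m = x * 5)) := by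
  obtain ⟨a, b, c, rfl⟩ := h
  match a, b, c with
  | 0, 0, 0 => exact Or.inl (by norm_num)
  | a + 1, b, c =>
    have hx : Smooth ((2:Int) ^ a * 3 ^ b * 5 ^ c) := ⟨a, b, c, rfl⟩
    have h1 := smooth_pos hx
    have he : (2:Int) ^ (a + 1) * 3 ^ b * 5 ^ c = (2 ^ a * 3 ^ b * 5 ^ c) * 2 := by ring
    exact Or.inr ⟨by rw [he]; linarith, _, hx, h1, by rw [he]; linarith, Or.inl he⟩
  | 0, b + 1, c =>
    have hx : Smooth ((2:Int) ^ 0 * 3 ^ b * 5 ^ c) := ⟨0, b, c, rfl⟩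
    have h1 := smooth_pos hx
    have he : (2:Int) ^ 0 * 3 ^ (b + 1) * 5 ^ c = (2 ^ 0 * 3 ^ b * 5 ^ c) * 3 := by ring
    exact Or.inr ⟨by rw [he]; linarith, _, hx, h1, by rw [he]; linarith, Or.inr (Or.inl he)⟩
  | 0, 0, c + 1 =>
    have hx : Smooth ((2:Int) ^ 0 * 3 ^ 0 * 5 ^ c) := ⟨0, 0, c, rfl⟩
    have h1 := smooth_pos hx
    have he : (2:Int) ^ 0 * 3 ^ 0 * 5 ^ (c + 1) = (2 ^ 0 * 3 ^ 0 * 5 ^ c) * 5 := by ring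
    exact Or.inr ⟨by rw [he]; linarith, _, hx, h1, by rw [he]; linarith, Or.inr (Or.inr he)⟩

lemma smooth_one_or_two_le {m : Int} (h : Smooth m) : m = 1 ∨ 2 ≤ m := by
  rcases smooth_cases h with h1 | ⟨h2, _⟩
  · exact Or.inl h1
  · exact Or.inr h2

-- ===== A-side: loop invariant of the three-pointer merge =====

def ptrOk (t : Int) (h : List Int) (i : Nat) (p : Int) : Prop :=
  i < h.length ∧ t < h.getD i 0 * p ∧ ∀ j, j < i → h.getD j 0 * p ≤ t

def HamInv (L : Int) (h : List Int) (t : Int) : Prop :=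
  t ∈ h ∧ (∀ x ∈ h, x ≤ t) ∧ h.Pairwise (· < ·) ∧
  (∀ x ∈ h, x ≤ L ∨ x = 1) ∧
  (∀ x, x ∈ h ↔ (x = 1 ∨ (2 ≤ x ∧ x ≤ t ∧ Smooth x)))

def HamInvP (L : Int) (h : List Int) (i2 i3 i5 : Nat) (t : Int) : Prop :=
  HamInv L h t ∧ ptrOk t h i2 2 ∧ ptrOk t h i3 3 ∧ ptrOk t h i5 5

lemma mem_smooth_of_inv {L h t x} (hI : HamInv L h t) (hx : x ∈ h) : Smooth x := by
  rcases (hI.2.2.2.2 x).mp hx with rfl | ⟨_, _, hs⟩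
  · exact smooth_one
  · exact hs

lemma one_le_t_of_inv {L h t} (hI : HamInv L h t) : 1 ≤ t := by
  have h1 : (1:Int) ∈ h := (hI.2.2.2.2 1).mpr (Or.inl rfl)
  exact hI.2.1 1 h1

lemma getD_mem {h : List Int} {i : Nat} (hi : i < h.length) : h.getD i 0 ∈ h := by
  rw [List.getD_eq_getElem h 0 hi]
  exact List.getElem_mem hi

-- under ptrOk, the candidate h[i]*p is ≤ x*p for every x ∈ h with t < x*p
lemma ptr_bound {t : Int} {h : List Int} {i : Nat} {p x : Int}
    (hs : h.Pairwise (· < ·)) (hp : ptrOk t h i p) (hx : x ∈ h)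
    (hgt : t < x * p) (hpp : 0 < p) : h.getD i 0 * p ≤ x * p := by
  obtain ⟨hil, hgt', hle⟩ := hp
  obtain ⟨j, hj, rfl⟩ := List.mem_iff_getElem.mp hx
  have hij : i ≤ j := by
    by_contra hlt
    push Not at hlt
    have hb := hle j hlt
    rw [List.getD_eq_getElem h 0 hj] at hb
    linarith
  have hmono : h.getD i 0 ≤ h[j] := by
    rw [List.getD_eq_getElem h 0 hil]
    rcases Nat.lt_or_ge i j with hlt | hge
    · exact le_of_lt (List.pairwise_iff_getElem.mp hs i j hil hj hlt)
    · have : i = j := le_antisymm hij hge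
      subst this; exact le_refl _
  exact mul_le_mul_of_nonneg_right hmono (le_of_lt hpp)

-- the minimum of the three candidates is ≤ every smooth number above t
lemma next_ge {L : Int} {h : List Int} {i2 i3 i5 : Nat} {t : Int} (hI : HamInvP L h i2 i3 i5 t) :
    ∀ m : Int, Smooth m → t < m →
      min (min (h.getD i2 0 * 2) (h.getD i3 0 * 3)) (h.getD i5 0 * 5) ≤ m := by
  have main : ∀ n : ℕ, ∀ m : Int, m.toNat = n → Smooth m → t < m →
      min (min (h.getD i2 0 * 2) (h.getD i3 0 * 3)) (h.getD i5 0 * 5) ≤ m := by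
    intro n
    induction n using Nat.strong_induction_on with
    | _ n IH =>
      intro m hn hm hmt
      have ht1 : 1 ≤ t := one_le_t_of_inv hI.1
      rcases smooth_cases hm with rfl | ⟨h2m, x, hsx, hx1, hxm, hcase⟩
      · linarith
      · by_cases hxt : x ≤ t
        · have hxh : x ∈ h := by
            apply (hI.1.2.2.2.2 x).mpr
            rcases smooth_one_or_two_le hsx with rfl | h2x
            · exact Or.inl rfl
            · exact Or.inr ⟨h2x, hxt, hsx⟩
          have hsorted := hI.1.2.2.1
          rcases hcase with he | he | he
          · have hb := ptr_bound hsorted hI.2.1 hxh (by rw [← he]; exact hmt) (by norm_num)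
            calc min (min (h.getD i2 0 * 2) (h.getD i3 0 * 3)) (h.getD i5 0 * 5)
                ≤ h.getD i2 0 * 2 := le_trans (min_le_left _ _) (min_le_left _ _)
              _ ≤ x * 2 := hb
              _ = m := he.symm
          · have hb := ptr_bound hsorted hI.2.2.1 hxh (by rw [← he]; exact hmt) (by norm_num)
            calc min (min (h.getD i2 0 * 2) (h.getD i3 0 * 3)) (h.getD i5 0 * 5)
                ≤ h.getD i3 0 * 3 := le_trans (min_le_left _ _) (min_le_right _ _)
              _ ≤ x * 3 := hb
              _ = m := he.symm
          · have hb := ptr_bound hsorted hI.2.2.2 hxh (by rw [← he]; exact hmt) (by norm_num)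
            calc min (min (h.getD i2 0 * 2) (h.getD i3 0 * 3)) (h.getD i5 0 * 5)
                ≤ h.getD i5 0 * 5 := min_le_right _ _
              _ ≤ x * 5 := hb
              _ = m := he.symm
        · push Not at hxt
          have hIH := IH x.toNat (by omega) x rfl hsx hxt
          linarith
  intro m hm hmt
  exact main m.toNat m rfl hm hmt

-- the three candidates are smooth and above t, hence so is their minimum
lemma next_smooth_gt {L : Int} {h : List Int} {i2 i3 i5 : Nat} {t : Int} (hI : HamInvP L h i2 i3 i5 t) :
    Smooth (min (min (h.getD i2 0 * 2) (h.getD i3 0 * 3)) (h.getD i5 0 * 5)) ∧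
      t < min (min (h.getD i2 0 * 2) (h.getD i3 0 * 3)) (h.getD i5 0 * 5) := by
  have c2 : Smooth (h.getD i2 0 * 2) := smooth_mul_two (mem_smooth_of_inv hI.1 (getD_mem hI.2.1.1))
  have c3 : Smooth (h.getD i3 0 * 3) := smooth_mul_three (mem_smooth_of_inv hI.1 (getD_mem hI.2.2.1.1))
  have c5 : Smooth (h.getD i5 0 * 5) := smooth_mul_five (mem_smooth_of_inv hI.1 (getD_mem hI.2.2.2.1))
  refine ⟨?_, lt_min (lt_min hI.2.1.2.1 hI.2.2.1.2.1) hI.2.2.2.2.1⟩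
  rcases min_choice (min (h.getD i2 0 * 2) (h.getD i3 0 * 3)) (h.getD i5 0 * 5) with he | he <;> rw [he]
  · rcases min_choice (h.getD i2 0 * 2) (h.getD i3 0 * 3) with he2 | he2 <;> rw [he2]
    · exact c2
    · exact c3
  · exact c5

lemma ptr_step {t v : Int} {h : List Int} {i : Nat} {p : Int}
    (hs : h.Pairwise (· < ·)) (hp : ptrOk t h i p) (htv : t < v)
    (hvle : v ≤ h.getD i 0 * p) (hv2 : 2 ≤ v) (hp2 : 2 ≤ p) :
    ptrOk v (h ++ [v]) (if v = h.getD i 0 * p then i + 1 else i) p := by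
  obtain ⟨hil, hgt, hle⟩ := hp
  have hgetl : ∀ j : Nat, j < h.length → (h ++ [v]).getD j 0 = h.getD j 0 := by
    intro j hj
    rw [List.getD_eq_getElem _ 0 (by simp; omega), List.getD_eq_getElem h 0 hj,
      List.getElem_append_left hj]
  have hgetv : (h ++ [v]).getD h.length 0 = v := by
    rw [List.getD_eq_getElem _ 0 (by simp)]
    simp
  split_ifs with heq
  · refine ⟨by simp; omega, ?_, ?_⟩
    · by_cases hi1 : i + 1 < h.length
      · rw [hgetl _ hi1]
        have hlt : h.getD i 0 < h.getD (i + 1) 0 := by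
          rw [List.getD_eq_getElem h 0 hil, List.getD_eq_getElem h 0 hi1]
          exact List.pairwise_iff_getElem.mp hs i (i + 1) hil hi1 (by omega)
        calc v = h.getD i 0 * p := heq
          _ < h.getD (i + 1) 0 * p := by nlinarith
      · have hieq : i + 1 = h.length := by omega
        rw [hieq, hgetv]
        nlinarith
    · intro j hj
      rcases Nat.lt_or_ge j i with hji | hji
      · rw [hgetl _ (lt_trans hji hil)]
        have := hle j hji
        linarith
      · have : j = i := by omega
        subst this
        rw [hgetl _ hil, ← heq]
  · refine ⟨by simp; omega, ?_, ?_⟩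
    · rw [hgetl _ hil]
      exact lt_of_le_of_ne hvle heq
    · intro j hj
      rw [hgetl _ (lt_trans hj hil)]
      have := hle j hj
      linarith

lemma inv_step {L : Int} {h : List Int} {i2 i3 i5 : Nat} {t : Int}
    (hI : HamInvP L h i2 i3 i5 t)
    (hvle : min (min (h.getD i2 0 * 2) (h.getD i3 0 * 3)) (h.getD i5 0 * 5) ≤ L) :
    HamInvP L (h ++ [min (min (h.getD i2 0 * 2) (h.getD i3 0 * 3)) (h.getD i5 0 * 5)])
      (if min (min (h.getD i2 0 * 2) (h.getD i3 0 * 3)) (h.getD i5 0 * 5) = h.getD i2 0 * 2 then i2 + 1 else i2)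
      (if min (min (h.getD i2 0 * 2) (h.getD i3 0 * 3)) (h.getD i5 0 * 5) = h.getD i3 0 * 3 then i3 + 1 else i3)
      (if min (min (h.getD i2 0 * 2) (h.getD i3 0 * 3)) (h.getD i5 0 * 5) = h.getD i5 0 * 5 then i5 + 1 else i5)
      (min (min (h.getD i2 0 * 2) (h.getD i3 0 * 3)) (h.getD i5 0 * 5)) := by
  obtain ⟨hsm, htv⟩ := next_smooth_gt hI
  have hmin := next_ge hI
  have ht1 : 1 ≤ t := one_le_t_of_inv hI.1
  set v := min (min (h.getD i2 0 * 2) (h.getD i3 0 * 3)) (h.getD i5 0 * 5) with hv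
  have hv2 : 2 ≤ v := by linarith
  obtain ⟨⟨htm, hub, hsorted, hle1, hchar⟩, hp2, hp3, hp5⟩ := hI
  refine ⟨⟨by simp, ?_, ?_, ?_, ?_⟩, ?_, ?_, ?_⟩
  · intro x hx
    rcases List.mem_append.mp hx with hx | hx
    · have := hub x hx; linarith
    · simp at hx; omega
  · refine List.pairwise_append.mpr ⟨hsorted, by simp, ?_⟩
    intro x hx y hy
    simp at hy; subst hy
    have := hub x hx; linarith
  · intro x hx
    rcases List.mem_append.mp hx with hx | hx
    · exact hle1 x hx
    · simp at hx; subst hx; exact Or.inl hvle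
  · intro x
    constructor
    · intro hx
      rcases List.mem_append.mp hx with hx | hx
      · rcases (hchar x).mp hx with rfl | ⟨h2x, hxt, hsx⟩
        · exact Or.inl rfl
        · exact Or.inr ⟨h2x, by linarith, hsx⟩
      · simp at hx; subst hx
        exact Or.inr ⟨hv2, le_refl _, hsm⟩
    · rintro (rfl | ⟨h2x, hxv, hsx⟩)
      · exact List.mem_append.mpr (Or.inl ((hchar 1).mpr (Or.inl rfl)))
      · by_cases hxt : x ≤ t
        · exact List.mem_append.mpr (Or.inl ((hchar x).mpr (Or.inr ⟨h2x, hxt, hsx⟩)))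
        · push Not at hxt
          have := hmin x hsx hxt
          have hxeq : x = v := le_antisymm hxv this
          subst hxeq
          simp
  · exact ptr_step hsorted hp2 htv (le_trans (min_le_left _ _) (min_le_left _ _)) hv2 (by norm_num)
  · exact ptr_step hsorted hp3 htv (le_trans (min_le_left _ _) (min_le_right _ _)) hv2 (by norm_num)
  · exact ptr_step hsorted hp5 htv (min_le_right _ _) hv2 (by norm_num)

lemma aloop_char (L : Int) : ∀ (f : Nat) (h : List Int) (i2 i3 i5 : Nat) (t : Int),
    HamInvP L h i2 i3 i5 t → (L - t).toNat < f →
    (aloop L f h i2 i3 i5).Pairwise (· < ·) ∧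
    (∀ x, x ∈ aloop L f h i2 i3 i5 ↔ (x = 1 ∨ (2 ≤ x ∧ x ≤ L ∧ Smooth x))) := by
  intro f
  induction f with
  | zero =>
    intro h i2 i3 i5 t hI hf
    omega
  | succ f IH =>
    intro h i2 i3 i5 t hI hf
    simp only [aloop]
    by_cases hgt : min (min (h.getD i2 0 * 2) (h.getD i3 0 * 3)) (h.getD i5 0 * 5) > L
    · rw [if_pos hgt]
      have hsorted := hI.1.2.2.1
      have hle1 := hI.1.2.2.2.1
      have hchar := hI.1.2.2.2.2
      refine ⟨hsorted, ?_⟩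
      intro x
      rw [hchar x]
      constructor
      · rintro (rfl | ⟨h2x, hxt, hsx⟩)
        · exact Or.inl rfl
        · have hxh : x ∈ h := (hchar x).mpr (Or.inr ⟨h2x, hxt, hsx⟩)
          rcases hle1 x hxh with hL | rfl
          · exact Or.inr ⟨h2x, hL, hsx⟩
          · exact Or.inl rfl
      · rintro (rfl | ⟨h2x, hxL, hsx⟩)
        · exact Or.inl rfl
        · right
          refine ⟨h2x, ?_, hsx⟩
          by_contra hxt
          push Not at hxt
          have := next_ge hI x hsx hxt
          linarith
    · rw [if_neg hgt]
      push Not at hgt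
      have hstep := inv_step hI hgt
      have htv := (next_smooth_gt hI).2
      exact IH _ _ _ _ _ hstep (by omega)

-- ===== B-side: membership of the nested power loops =====

lemma bloop5_mem (L p : Int) (vals : PySem.Set Int) (x : Int) (hp : 0 < p) :
    x ∈ bloop5 L p vals ↔ x ∈ vals ∨ ∃ c : ℕ, x = p * 5 ^ c ∧ x ≤ L := by
  revert hp
  induction p, vals using bloop5.induct (limit := L) with
  | case1 p vals hg IH =>
    intro hp
    rw [bloop5, dif_pos hg, IH (by linarith)]
    rw [PySem.Set.mem_add]
    constructor
    · rintro ((hx | rfl) | ⟨c, rfl, hcL⟩)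
      · exact Or.inl hx
      · exact Or.inr ⟨0, by ring, hg.1⟩
      · exact Or.inr ⟨c + 1, by ring, hcL⟩
    · rintro (hx | ⟨c, rfl, hcL⟩)
      · exact Or.inl (Or.inl hx)
      · match c with
        | 0 => exact Or.inl (Or.inr (by ring))
        | c + 1 => exact Or.inr ⟨c, by ring, by linarith [hcL]⟩
  | case2 p vals hg =>
    intro hp
    have hLp : L < p := by
      rcases not_and_or.mp hg with hx | hx
      · omega
      · omega
    rw [bloop5, dif_neg hg]
    constructor
    · exact Or.inl
    · rintro (hx | ⟨c, rfl, hcL⟩)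
      · exact hx
      · exfalso
        have h1 : p ≤ p * 5 ^ c := le_mul_of_one_le_right (le_of_lt hp) (one_le_pow₀ (by norm_num))
        linarith

lemma bloop3_mem (L p : Int) (vals : PySem.Set Int) (x : Int) (hp : 0 < p) :
    x ∈ bloop3 L p vals ↔ x ∈ vals ∨ ∃ b c : ℕ, x = p * 3 ^ b * 5 ^ c ∧ x ≤ L := by
  revert hp
  induction p, vals using bloop3.induct (limit := L) with
  | case1 p vals hg IH =>
    intro hp
    rw [bloop3, dif_pos hg, IH (by linarith), bloop5_mem L p vals x hp]
    constructor
    · rintro ((hx | ⟨c, rfl, hcL⟩) | ⟨b, c, rfl, hcL⟩)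
      · exact Or.inl hx
      · exact Or.inr ⟨0, c, by ring, hcL⟩
      · exact Or.inr ⟨b + 1, c, by ring, by linarith [hcL]⟩
    · rintro (hx | ⟨b, c, rfl, hcL⟩)
      · exact Or.inl (Or.inl hx)
      · match b with
        | 0 => exact Or.inl (Or.inr ⟨c, by ring, by linarith [hcL]⟩)
        | b + 1 => exact Or.inr ⟨b, c, by ring, by linarith [hcL]⟩
  | case2 p vals hg =>
    intro hp
    have hLp : L < p := by
      rcases not_and_or.mp hg with hx | hx
      · omega
      · omega
    rw [bloop3, dif_neg hg]
    constructor
    · exact Or.inl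
    · rintro (hx | ⟨b, c, rfl, hcL⟩)
      · exact hx
      · exfalso
        have h35 : (1:Int) ≤ 3 ^ b * 5 ^ c := by
          have h3 : (1:Int) ≤ 3 ^ b := one_le_pow₀ (by norm_num)
          have h5 : (1:Int) ≤ 5 ^ c := one_le_pow₀ (by norm_num)
          nlinarith
        have h1 : p ≤ p * 3 ^ b * 5 ^ c := by nlinarith
        linarith

lemma bloop2_mem (L p : Int) (vals : PySem.Set Int) (x : Int) (hp : 0 < p) :
    x ∈ bloop2 L p vals ↔ x ∈ vals ∨ ∃ a b c : ℕ, x = p * 2 ^ a * 3 ^ b * 5 ^ c ∧ x ≤ L := by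
  revert hp
  induction p, vals using bloop2.induct (limit := L) with
  | case1 p vals hg IH =>
    intro hp
    rw [bloop2, dif_pos hg, IH (by linarith), bloop3_mem L p vals x hp]
    constructor
    · rintro ((hx | ⟨b, c, rfl, hcL⟩) | ⟨a, b, c, rfl, hcL⟩)
      · exact Or.inl hx
      · exact Or.inr ⟨0, b, c, by ring, by linarith [hcL]⟩
      · exact Or.inr ⟨a + 1, b, c, by ring, by linarith [hcL]⟩
    · rintro (hx | ⟨a, b, c, rfl, hcL⟩)
      · exact Or.inl (Or.inl hx)
      · match a with
        | 0 => exact Or.inl (Or.inr ⟨b, c, by ring, by linarith [hcL]⟩)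
        | a + 1 => exact Or.inr ⟨a, b, c, by ring, by linarith [hcL]⟩
  | case2 p vals hg =>
    intro hp
    have hLp : L < p := by
      rcases not_and_or.mp hg with hx | hx
      · omega
      · omega
    rw [bloop2, dif_neg hg]
    constructor
    · exact Or.inl
    · rintro (hx | ⟨a, b, c, rfl, hcL⟩)
      · exact hx
      · exfalso
        have h2 : (1:Int) ≤ 2 ^ a := one_le_pow₀ (by norm_num)
        have h3 : (1:Int) ≤ 3 ^ b := one_le_pow₀ (by norm_num)
        have h5 : (1:Int) ≤ 5 ^ c := one_le_pow₀ (by norm_num)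
        have h23 : (1:Int) ≤ 2 ^ a * 3 ^ b := by nlinarith
        have h235 : (1:Int) ≤ 2 ^ a * 3 ^ b * 5 ^ c := by nlinarith
        have h1 : p ≤ p * 2 ^ a * 3 ^ b * 5 ^ c := by nlinarith
        linarith

lemma bloop5_nodup (L p : Int) (vals : PySem.Set Int) (hv : vals.Nodup) : (bloop5 L p vals).Nodup := by
  revert hv
  induction p, vals using bloop5.induct (limit := L) with
  | case1 p vals hg IH =>
    intro hv
    rw [bloop5, dif_pos hg]
    exact IH (PySem.Set.nodup_add _ _ hv)
  | case2 p vals hg =>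
    intro hv
    rw [bloop5, dif_neg hg]
    exact hv

lemma bloop3_nodup (L p : Int) (vals : PySem.Set Int) (hv : vals.Nodup) : (bloop3 L p vals).Nodup := by
  revert hv
  induction p, vals using bloop3.induct (limit := L) with
  | case1 p vals hg IH =>
    intro hv
    rw [bloop3, dif_pos hg]
    exact IH (bloop5_nodup L p vals hv)
  | case2 p vals hg =>
    intro hv
    rw [bloop3, dif_neg hg]
    exact hv

lemma bloop2_nodup (L p : Int) (vals : PySem.Set Int) (hv : vals.Nodup) : (bloop2 L p vals).Nodup := by
  revert hv
  induction p, vals using bloop2.induct (limit := L) with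
  | case1 p vals hg IH =>
    intro hv
    rw [bloop2, dif_pos hg]
    exact IH (bloop3_nodup L p vals hv)
  | case2 p vals hg =>
    intro hv
    rw [bloop2, dif_neg hg]
    exact hv

lemma bvals_mem (L x : Int) :
    x ∈ bloop2 L 1 (PySem.Set.ofList [1]) ↔ (x = 1 ∨ (2 ≤ x ∧ x ≤ L ∧ Smooth x)) := by
  rw [bloop2_mem L 1 (PySem.Set.ofList [1]) x one_pos]
  constructor
  · rintro (h1 | ⟨a, b, c, rfl, hL⟩)
    · rw [PySem.Set.mem_ofList] at h1
      simp at h1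
      exact Or.inl h1
    · have hs : Smooth (1 * 2 ^ a * 3 ^ b * 5 ^ c : Int) := ⟨a, b, c, by ring⟩
      rcases smooth_one_or_two_le hs with h1 | h2
      · exact Or.inl h1
      · exact Or.inr ⟨h2, hL, hs⟩
  · rintro (rfl | ⟨h2, hL, hs⟩)
    · left
      rw [PySem.Set.mem_ofList]
      simp
    · obtain ⟨a, b, c, rfl⟩ := hs
      exact Or.inr ⟨a, b, c, by ring, hL⟩

lemma init_inv (L : Int) : HamInvP L [1] 0 0 0 1 := by
  refine ⟨⟨by simp, by simp, by simp, ?_, ?_⟩, ?_, ?_, ?_⟩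
  · intro x hx
    simp at hx
    exact Or.inr hx
  · intro x
    simp only [List.mem_singleton]
    constructor
    · rintro rfl; exact Or.inl rfl
    · rintro (rfl | ⟨h2, h1, _⟩)
      · rfl
      · omega
  · exact ⟨by simp, by norm_num [List.getD], by omega⟩
  · exact ⟨by simp, by norm_num [List.getD], by omega⟩
  · exact ⟨by simp, by norm_num [List.getD], by omega⟩

-- ===== VERDICT (by name: the statement is the Claim_ definition above) =====
theorem generate_hamming_spec : Claim_equal_generate_hamming := by
  intro L _
  unfold Spec_generate_hamming generate_hamming generate_hamming_alt
  show hammingDict (aloop L (L.toNat + 1) [1] 0 0 0) =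
    hammingDict (PySem.List.sorted (bloop2 L 1 (PySem.Set.ofList [1])) (fun x => x) false)
  have hA := aloop_char L (L.toNat + 1) [1] 0 0 0 1 (init_inv L) (by omega)
  have hBnodup := bloop2_nodup L 1 (PySem.Set.ofList [1]) (PySem.Set.nodup_ofList _)
  have hAnodup : (aloop L (L.toNat + 1) [1] 0 0 0).Nodup := hA.1.nodup
  have hperm : (aloop L (L.toNat + 1) [1] 0 0 0).Perm (bloop2 L 1 (PySem.Set.ofList [1])) :=
    (List.perm_ext_iff_of_nodup hAnodup hBnodup).mpr
      (fun a => (hA.2 a).trans (bvals_mem L a).symm)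
  have hsort : PySem.List.sorted (bloop2 L 1 (PySem.Set.ofList [1])) (fun x : Int => x) false
      = aloop L (L.toNat + 1) [1] 0 0 0 :=
    PySem.List.sorted_eq_of_perm_of_pairwise_lt _ _ _ hperm hA.1
  rw [hsort]
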